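-- pv_equiv track=rewrite | github.com/Edumail31/ordermypdf | app/prompt_sanitizer.py | _matches_known_alias
-- ===== SOURCE A (Python) =====
-- KNOWN_ALIASES = {
--     "to docx", "to doc", "to word", "as docx", "as word",
--     "to pdf", "as pdf",
--     "to png", "to jpg", "to jpeg", "to img", "to image", "to images",
--     "as png", "as jpg", "as jpeg", "as img",
--     "to txt", "to text", "as txt",
--     "ocr", "compress", "merge", "split", "rotate", "flatten",
--     "enhance", "clean", "watermark",
--     "too docx", "too doc", "too pdf", "too word",
--     "too png", "too jpg", "too img",
--     "tto docx", "tto pdf", "tto png",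
--     "2 docx", "2 pdf", "2 png", "2 word",
--     "to dox", "to dcox", "to doxx", "to pfd",
--     "compres", "comprs", "comress",
--     "splt", "splitt",
--     "merg", "mrge",
--     "rotat", "roate",
--     "cnvrt", "convrt",
-- }
--
-- def _matches_known_alias(text: str) -> bool:
--     """Check if text matches a known alias pattern."""
--     text_lower = text.lower().strip()
--
--     if text_lower in KNOWN_ALIASES:
--         return True
--
--     for alias in KNOWN_ALIASES:
--         if len(text_lower) >= 3 and len(alias) >= 3:
--             if text_lower.startswith(alias[:3]) or alias.startswith(text_lower[:3]):
--                 return True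
--
--     return False
-- ===== SOURCE B (Python) =====
-- # Every alias in the original KNOWN_ALIASES has length >= 3, so both the exact-membership
-- # test and both startswith directions collapse to "the first three characters of the
-- # stripped, lowered text form a known alias prefix".  The 20 distinct 3-character
-- # prefixes are hard-coded below; no alias table and no scanning loop remain.
-- _PREFIXES = frozenset({
--     "2 d", "2 p", "2 w", "as ", "cle", "cnv", "com", "con", "enh", "fla",
--     "mer", "mrg", "ocr", "roa", "rot", "spl", "to ", "too", "tto", "wat",
-- })
--
-- def _matches_known_alias(text: str) -> bool:
--     """Check if text matches a known alias pattern."""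
--     text_lower = text.lower().strip()
--     return len(text_lower) >= 3 and text_lower[:3] in _PREFIXES
-- ===== Notes on version B (the rewrite author's own statement) =====
-- stated objective: simpler
-- what changed: B drops the alias table, the exact-membership fast path and the per-alias scanning loop entirely: since every alias has length >= 3, both startswith directions collapse to equality of 3-character prefixes, so B hard-codes the 20 distinct 3-character alias prefixes and answers with one length test plus one frozenset lookup.
import Mathlib
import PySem

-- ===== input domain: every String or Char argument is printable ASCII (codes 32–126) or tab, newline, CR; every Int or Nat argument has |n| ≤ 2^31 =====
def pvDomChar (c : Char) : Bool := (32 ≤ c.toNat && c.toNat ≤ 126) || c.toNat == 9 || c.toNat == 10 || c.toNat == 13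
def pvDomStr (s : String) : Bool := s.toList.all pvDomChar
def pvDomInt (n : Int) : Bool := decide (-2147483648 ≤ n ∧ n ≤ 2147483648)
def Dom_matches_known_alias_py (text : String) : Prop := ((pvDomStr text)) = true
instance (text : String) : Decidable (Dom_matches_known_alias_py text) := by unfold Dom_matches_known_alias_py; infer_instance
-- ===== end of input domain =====

set_option maxRecDepth 16384

-- B replaces the alias table, the exact-membership fast path and the per-alias scanning loop
-- by one lookup of the text's 3-char prefix in a hard-coded list of the 20 distinct
-- 3-character alias prefixes (every alias has length ≥ 3, so both startswith directions
-- collapse to equality of 3-character prefixes); objective: simpler.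

-- ===== PORT A =====
-- the module constant KNOWN_ALIASES (a Python set literal), in source order
def pvKnownAliasesList : List String :=
  ["to docx", "to doc", "to word", "as docx", "as word",
   "to pdf", "as pdf",
   "to png", "to jpg", "to jpeg", "to img", "to image", "to images",
   "as png", "as jpg", "as jpeg", "as img",
   "to txt", "to text", "as txt",
   "ocr", "compress", "merge", "split", "rotate", "flatten",
   "enhance", "clean", "watermark",
   "too docx", "too doc", "too pdf", "too word",
   "too png", "too jpg", "too img",
   "tto docx", "tto pdf", "tto png",
   "2 docx", "2 pdf", "2 png", "2 word",
   "to dox", "to dcox", "to doxx", "to pfd",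
   "compres", "comprs", "comress",
   "splt", "splitt",
   "merg", "mrge",
   "rotat", "roate",
   "cnvrt", "convrt"]

def pvKnownAliases : PySem.Set String := PySem.Set.ofList pvKnownAliasesList

def matches_known_alias_py (text : String) : Bool :=
  let text_lower := PySem.Str.strip (PySem.Str.lower text)
  if PySem.Set.contains pvKnownAliases text_lower then true
  else
    -- for alias in KNOWN_ALIASES: … return True / fall through to return False
    -- (the result of any is independent of the set's iteration order)
    pvKnownAliases.any (fun al =>
      (decide (3 ≤ PySem.Str.len text_lower) && decide (3 ≤ PySem.Str.len al)) &&
      (PySem.Str.startswith text_lower (PySem.Str.slice al none (some 3)) ||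
       PySem.Str.startswith al (PySem.Str.slice text_lower none (some 3))))

-- ===== PORT B =====
-- _PREFIXES: the hard-coded frozenset literal of Source B (20 distinct 3-char prefixes)
def pvPrefixList : List String :=
  ["2 d", "2 p", "2 w", "as ", "cle", "cnv", "com", "con", "enh", "fla",
   "mer", "mrg", "ocr", "roa", "rot", "spl", "to ", "too", "tto", "wat"]

def matches_known_alias_py_alt (text : String) : Bool :=
  let text_lower := PySem.Str.strip (PySem.Str.lower text)
  decide (3 ≤ PySem.Str.len text_lower) &&
    pvPrefixList.contains (PySem.Str.slice text_lower none (some 3))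

-- ===== PRECONDITION & SPEC =====
def Spec_matches_known_alias_py (text : String) (out : Bool) : Prop := out = matches_known_alias_py_alt text
instance (text : String) (out : Bool) : Decidable (Spec_matches_known_alias_py text out) := by unfold Spec_matches_known_alias_py; infer_instance

-- ===== CLAIM (what is proved, stated in full; the proofs are below) =====
def Claim_equal_matches_known_alias_py : Prop := ∀ (text : String), Dom_matches_known_alias_py text → Spec_matches_known_alias_py text (matches_known_alias_py text)

-- ===== LEMMAS AND PROOFS =====

theorem pvContainsIff (s : PySem.Set String) (x : String) :
    PySem.Set.contains s x = true ↔ x ∈ s := by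
  simp [PySem.Set.contains]

theorem pvAliasLen : ∀ s ∈ pvKnownAliasesList, 3 ≤ PySem.Str.len s := by decide

theorem pvLenToList (t : String) (ht : 3 ≤ PySem.Str.len t) : 3 ≤ t.toList.length := by
  rw [show PySem.Str.len t = (t.toList.length : Int) from by simp] at ht
  exact_mod_cast ht

theorem pvSliceToList (t : String) :
    (PySem.Str.slice t none (some 3)).toList = t.toList.take 3 := by
  rw [PySem.Str.toList_slice, PySem.Chars.slice_eq_listSlice,
      PySem.List.slice_to _ (by norm_num : (0:Int) ≤ 3)]
  rfl

theorem pvTakePrefix (l p : List Char) (hp : 3 ≤ p.length) :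
    (PySem.Chars.startswith l (p.take 3) = true) ↔ l.take 3 = p.take 3 := by
  rw [PySem.Chars.startswith_iff, List.prefix_iff_eq_take,
      List.length_take, Nat.min_eq_left hp]
  exact eq_comm

-- both startswith directions collapse to equality of the two 3-char prefixes
theorem pvBothDir (t a : String) (ht : 3 ≤ PySem.Str.len t) (ha : 3 ≤ PySem.Str.len a) :
    ((PySem.Str.startswith t (PySem.Str.slice a none (some 3)) ||
      PySem.Str.startswith a (PySem.Str.slice t none (some 3))) = true)
    ↔ PySem.Str.slice t none (some 3) = PySem.Str.slice a none (some 3) := by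
  have ht' := pvLenToList t ht
  have ha' := pvLenToList a ha
  rw [← String.toList_inj, pvSliceToList, pvSliceToList, Bool.or_eq_true,
      PySem.Str.startswith_eq, PySem.Str.startswith_eq, pvSliceToList, pvSliceToList,
      pvTakePrefix t.toList a.toList ha', pvTakePrefix a.toList t.toList ht']
  constructor
  · intro h; rcases h with h | h
    · exact h
    · exact h.symm
  · intro h; exact Or.inl h

-- Source B's hard-coded prefix set holds exactly the 3-char prefixes of the aliases
theorem pvPrefixListChar :
    ∀ x, x ∈ pvPrefixList ↔ x ∈ pvKnownAliasesList.map (fun a => PySem.Str.slice a none (some 3)) := by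
  have h1 : ∀ x ∈ pvPrefixList,
      x ∈ pvKnownAliasesList.map (fun a => PySem.Str.slice a none (some 3)) := by decide
  have h2 : ∀ x ∈ pvKnownAliasesList.map (fun a => PySem.Str.slice a none (some 3)),
      x ∈ pvPrefixList := by decide
  exact fun x => ⟨h1 x, h2 x⟩

-- B's membership test, characterised
theorem pvPrefMem (t : String) :
    (pvPrefixList.contains (PySem.Str.slice t none (some 3)) = true)
    ↔ ∃ a ∈ pvKnownAliasesList,
        PySem.Str.slice t none (some 3) = PySem.Str.slice a none (some 3) := by
  rw [List.contains_iff_mem, pvPrefixListChar, List.mem_map]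
  constructor
  · rintro ⟨a, hm, he⟩; exact ⟨a, hm, he.symm⟩
  · rintro ⟨a, hm, he⟩; exact ⟨a, hm, he.symm⟩

-- A's body equals B's body, for any already lowered/stripped string t
theorem pvKey (t : String) :
    (if PySem.Set.contains pvKnownAliases t then true
     else
       pvKnownAliases.any (fun al =>
         (decide (3 ≤ PySem.Str.len t) && decide (3 ≤ PySem.Str.len al)) &&
         (PySem.Str.startswith t (PySem.Str.slice al none (some 3)) ||
          PySem.Str.startswith al (PySem.Str.slice t none (some 3)))))
    = (decide (3 ≤ PySem.Str.len t) &&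
       pvPrefixList.contains (PySem.Str.slice t none (some 3))) := by
  by_cases ht : 3 ≤ PySem.Str.len t
  · by_cases hm : PySem.Set.contains pvKnownAliases t = true
    · -- exact-membership fast path: t itself is an alias, so its prefix is in the index
      have htL : t ∈ pvKnownAliasesList := by
        have := (pvContainsIff _ _).mp hm
        rwa [pvKnownAliases, PySem.Set.mem_ofList] at this
      rw [if_pos hm, decide_eq_true ht, Bool.true_and, Eq.comm]
      exact (pvPrefMem t).mpr ⟨t, htL, rfl⟩
    · rw [if_neg hm, decide_eq_true ht, Bool.true_and]
      have hloop : (pvKnownAliases.any (fun al =>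
          (true && decide (3 ≤ PySem.Str.len al)) &&
          (PySem.Str.startswith t (PySem.Str.slice al none (some 3)) ||
           PySem.Str.startswith al (PySem.Str.slice t none (some 3)))) = true)
          ↔ ∃ a ∈ pvKnownAliasesList,
              PySem.Str.slice t none (some 3) = PySem.Str.slice a none (some 3) := by
        rw [List.any_eq_true]
        constructor
        · rintro ⟨a, hma, hfa⟩
          have hmaL : a ∈ pvKnownAliasesList := by
            rwa [pvKnownAliases, PySem.Set.mem_ofList] at hma
          have ha := pvAliasLen a hmaL
          simp only [decide_eq_true ha, Bool.true_and] at hfa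
          exact ⟨a, hmaL, (pvBothDir t a ht ha).mp hfa⟩
        · rintro ⟨a, hmaL, he⟩
          refine ⟨a, by rw [pvKnownAliases, PySem.Set.mem_ofList]; exact hmaL, ?_⟩
          have ha := pvAliasLen a hmaL
          simp only [decide_eq_true ha, Bool.true_and]
          exact (pvBothDir t a ht ha).mpr he
      have := hloop.trans (pvPrefMem t).symm
      cases hR : pvPrefixList.contains (PySem.Str.slice t none (some 3)) with
      | true => exact this.mpr hR
      | false =>
        cases hL : (pvKnownAliases.any _) with
        | false => rfl
        | true => rw [this.mp hL] at hR; exact absurd hR (by simp)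
  · -- text_lower shorter than 3: the loop guard never fires and no alias equals t
    have hm : PySem.Set.contains pvKnownAliases t = false := by
      rw [Bool.eq_false_iff]
      intro h
      have htL : t ∈ pvKnownAliasesList := by
        have := (pvContainsIff _ _).mp h
        rwa [pvKnownAliases, PySem.Set.mem_ofList] at this
      exact ht (pvAliasLen t htL)
    rw [if_neg (Bool.eq_false_iff.mp hm), decide_eq_false ht, Bool.false_and]
    rw [List.any_eq_false]
    intro a _
    simp

-- ===== VERDICT (by name: the statement is the Claim_ definition above) =====
theorem matches_known_alias_py_spec : Claim_equal_matches_known_alias_py := by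
  intro text _
  unfold Spec_matches_known_alias_py matches_known_alias_py matches_known_alias_py_alt
  exact pvKey (PySem.Str.strip (PySem.Str.lower text))
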